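-- pv_equiv track=rewrite | github.com/daniel-alt-pages/Reportes-sg-funcional | scripts/core/procesar.py | calcular_racha_consecutiva
-- ===== SOURCE A (Python) =====
-- def calcular_racha_consecutiva(respuestas_detalladas):
--     """
--     Calcula la racha actual de respuestas correctas e incorrectas consecutivas.
--     Retorna: (racha_correctas, racha_incorrectas, max_racha_correctas, max_racha_incorrectas)
--     """
--     if not respuestas_detalladas:
--         return 0, 0, 0, 0
--
--     # Aplanar todas las respuestas en orden
--     todas_respuestas = []
--     for materia, respuestas in respuestas_detalladas.items():
--         for r in respuestas:
--             todas_respuestas.append(r.get('es_correcta', False))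
--
--     if not todas_respuestas:
--         return 0, 0, 0, 0
--
--     # Racha actual (desde el final)
--     racha_actual = 1
--     es_correcta_actual = todas_respuestas[-1]
--     for i in range(len(todas_respuestas) - 2, -1, -1):
--         if todas_respuestas[i] == es_correcta_actual:
--             racha_actual += 1
--         else:
--             break
--
--     racha_correctas_actual = racha_actual if es_correcta_actual else 0
--     racha_incorrectas_actual = racha_actual if not es_correcta_actual else 0
--
--     # Máximas rachas históricas
--     max_correctas = max_incorrectas = 0
--     current_correctas = current_incorrectas = 0
--
--     for es_correcta in todas_respuestas:
--         if es_correcta: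
--             current_correctas += 1
--             current_incorrectas = 0
--             max_correctas = max(max_correctas, current_correctas)
--         else:
--             current_incorrectas += 1
--             current_correctas = 0
--             max_incorrectas = max(max_incorrectas, current_incorrectas)
--
--     return racha_correctas_actual, racha_incorrectas_actual, max_correctas, max_incorrectas
-- ===== SOURCE B (Python) =====
-- def _runs(xs):
--     """Run-length encode xs into [(value, length), ...] of maximal consecutive runs."""
--     runs = []
--     i = 0
--     while i < len(xs):
--         v = xs[i]
--         j = i + 1
--         while j < len(xs) and xs[j] == v:
--             j += 1
--         runs.append((v, j - i))
--         i = j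
--     return runs
--
--
-- def calcular_racha_consecutiva(respuestas_detalladas):
--     todas = [r.get('es_correcta', False)
--              for respuestas in respuestas_detalladas.values()
--              for r in respuestas]
--     if not todas:
--         return 0, 0, 0, 0
--     # current streak: length of the leading constant block of the reversed list
--     rev = todas[::-1]
--     actual = 1
--     for x in rev[1:]:
--         if x != rev[0]:
--             break
--         actual += 1
--     # historical maxima: longest true run / longest false run among the runs
--     max_c = 0
--     max_i = 0
--     for v, n in _runs(todas):
--         if v:
--             max_c = max(max_c, n)
--         else:
--             max_i = max(max_i, n)
--     if rev[0]:
--         return actual, 0, max_c, max_i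
--     return 0, actual, max_c, max_i
-- ===== Notes on version B (the rewrite author's own statement) =====
-- stated objective: alternative
-- what changed: B flattens with a comprehension and derives both streak maxima from a run-length encoding of the answer list (longest true/false run) and the current streak from the reversed list's leading constant block, instead of A's backwards index loop and four-counter stateful fold.
import Mathlib
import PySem

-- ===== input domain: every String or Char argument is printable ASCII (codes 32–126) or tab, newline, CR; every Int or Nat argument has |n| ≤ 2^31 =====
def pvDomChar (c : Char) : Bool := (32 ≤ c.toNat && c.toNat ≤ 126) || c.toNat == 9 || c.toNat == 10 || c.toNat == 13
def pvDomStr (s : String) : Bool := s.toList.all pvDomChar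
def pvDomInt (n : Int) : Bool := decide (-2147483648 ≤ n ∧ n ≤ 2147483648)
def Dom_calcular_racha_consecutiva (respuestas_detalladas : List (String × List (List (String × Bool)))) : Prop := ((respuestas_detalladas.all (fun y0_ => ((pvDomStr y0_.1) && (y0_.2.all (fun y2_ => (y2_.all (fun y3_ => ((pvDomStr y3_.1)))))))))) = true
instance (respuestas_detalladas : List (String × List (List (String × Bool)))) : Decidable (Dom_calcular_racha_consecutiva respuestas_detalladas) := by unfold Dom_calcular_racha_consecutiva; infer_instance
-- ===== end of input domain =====

-- B recomputes the streaks from a run-length encoding of the flattened answers instead of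
-- A's index count-down and four-counter fold; alternative decomposition, not claimed faster.

-- shared helper: Python r.get('es_correcta', False) on an association-list dict (first match)
def pvGetEC (r : List (String × Bool)) : Bool :=
  ((r.find? (fun p => p.1 == "es_correcta")).map Prod.snd).getD false

-- ===== PORT A =====
-- the loop 'for i in range(len(todas)-2, -1, -1): if todas[i] == t: racha += 1 else: break'
def aCurLoop (xs : List Bool) (t : Bool) : List Int → Int → Int
  | [], acc => acc
  | i :: rest, acc =>
    match PySem.List.pyGet? xs i with
    | none => acc            -- unreachable: every index produced by the range is in range
    | some v => if v == t then aCurLoop xs t rest (acc + 1) else acc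

-- one step of A's fold over (max_correctas, max_incorrectas, current_correctas, current_incorrectas)
def aMaxStep (s : Int × Int × Int × Int) (b : Bool) : Int × Int × Int × Int :=
  if b then (max s.1 (s.2.2.1 + 1), s.2.1, s.2.2.1 + 1, 0)
  else (s.1, max s.2.1 (s.2.2.2 + 1), 0, s.2.2.2 + 1)

-- A's body after the flattening loop
def aRest (todas : List Bool) : Int × Int × Int × Int :=
  if todas = [] then (0, 0, 0, 0)
  else
    match PySem.List.pyGet? todas (-1) with
    | none => (0, 0, 0, 0)   -- unreachable: todas ≠ []
    | some t =>
      let racha := aCurLoop todas t (PySem.List.pyRange ((todas.length : Int) - 2) (-1) (-1)) 1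
      let m := todas.foldl aMaxStep (0, 0, 0, 0)
      ((if t then racha else 0), (if t then 0 else racha), m.1, m.2.1)

def calcular_racha_consecutiva (respuestas_detalladas : List (String × List (List (String × Bool)))) : Int × Int × Int × Int :=
  if respuestas_detalladas = [] then (0, 0, 0, 0)
  else
    aRest (respuestas_detalladas.foldl
      (fun acc mr => mr.2.foldl (fun acc2 r => acc2 ++ [pvGetEC r]) acc) [])

-- ===== PORT B =====
-- run-length encoding of Source B's _runs: the outer while loop is the recursion on the remaining
-- suffix, the inner counting while loop is the takeWhile length
def runsOf : List Bool → List (Bool × Int)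
  | [] => []
  | v :: rest =>
    (v, 1 + ((rest.takeWhile (fun x => x == v)).length : Int))
      :: runsOf (rest.dropWhile (fun x => x == v))
termination_by xs => xs.length
decreasing_by
  simp only [List.length_cons]
  have := List.length_dropWhile_le (fun x => x == v) rest
  omega

-- 'for x in rev[1:]: if x != rev[0]: break; actual += 1'
def bCurLoop (v : Bool) : List Bool → Int → Int
  | [], acc => acc
  | x :: rest, acc => if x != v then acc else bCurLoop v rest (acc + 1)

-- 'for v, n in _runs(todas): max_c / max_i updates'
def bMaxStep (p : Int × Int) (vn : Bool × Int) : Int × Int :=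
  if vn.1 then (max p.1 vn.2, p.2) else (p.1, max p.2 vn.2)

-- B's body on the flattened list
def bRest (todas : List Bool) : Int × Int × Int × Int :=
  match todas.reverse with
  | [] => (0, 0, 0, 0)
  | v :: rest =>
    let actual := bCurLoop v rest 1
    let m := (runsOf todas).foldl bMaxStep (0, 0)
    if v then (actual, 0, m.1, m.2) else (0, actual, m.1, m.2)

def calcular_racha_consecutiva_alt (respuestas_detalladas : List (String × List (List (String × Bool)))) : Int × Int × Int × Int :=
  bRest (respuestas_detalladas.flatMap (fun mr => mr.2.map (fun r => pvGetEC r)))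

-- ===== PRECONDITION & SPEC =====
def Spec_calcular_racha_consecutiva (respuestas_detalladas : List (String × List (List (String × Bool)))) (out : Int × Int × Int × Int) : Prop := out = calcular_racha_consecutiva_alt respuestas_detalladas
instance (respuestas_detalladas : List (String × List (List (String × Bool)))) (out : Int × Int × Int × Int) : Decidable (Spec_calcular_racha_consecutiva respuestas_detalladas out) := by unfold Spec_calcular_racha_consecutiva; infer_instance

-- ===== CLAIM (what is proved, stated in full; the proofs are below) =====
def Claim_equal_calcular_racha_consecutiva : Prop := ∀ (respuestas_detalladas : List (String × List (List (String × Bool)))), Dom_calcular_racha_consecutiva respuestas_detalladas → Spec_calcular_racha_consecutiva respuestas_detalladas (calcular_racha_consecutiva respuestas_detalladas)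

-- ===== LEMMAS AND PROOFS =====

-- A's flattening foldl builds the same list as B's flatMap
theorem flatten_eq (rd : List (String × List (List (String × Bool)))) :
    rd.foldl (fun acc mr => mr.2.foldl (fun acc2 r => acc2 ++ [pvGetEC r]) acc) [] =
      rd.flatMap (fun mr => mr.2.map (fun r => pvGetEC r)) := by
  have h1 : (fun (acc : List Bool) (mr : String × List (List (String × Bool))) =>
      mr.2.foldl (fun acc2 r => acc2 ++ [pvGetEC r]) acc) =
      (fun acc mr => acc ++ mr.2.map (fun r => pvGetEC r)) := by
    funext acc mr
    exact PySem.List.foldl_append_singleton_eq_map _ _ _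
  rw [h1, PySem.List.foldl_append_eq_flatMap]
  simp

-- A's count-down index loop counts the leading block of (take m).reverse equal to t
theorem aCurLoop_eq (xs : List Bool) (t : Bool) :
    ∀ (m : Nat) (acc : Int), m ≤ xs.length →
      aCurLoop xs t (PySem.List.pyRange ((m : Int) - 1) (-1) (-1)) acc
        = acc + ((((xs.take m).reverse.takeWhile (fun x => x == t)).length : Int)) := by
  intro m
  induction m with
  | zero =>
    intro acc _
    rw [PySem.List.pyRange_neg_one_eq_nil (by norm_num)]
    simp [aCurLoop]
  | succ m ih =>
    intro acc hm
    have hmlt : m < xs.length := by omega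
    have harg : ((m + 1 : Nat) : Int) - 1 = (m : Int) := by push_cast; ring
    rw [harg, PySem.List.pyRange_neg_one_cons (by omega)]
    have hget : PySem.List.pyGet? xs (m : Int) = some xs[m] := by
      simp [PySem.List.pyGet?_natCast, List.getElem?_eq_getElem hmlt]
    have hrev : (xs.take (m + 1)).reverse = xs[m] :: (xs.take m).reverse := by
      rw [List.take_add_one]
      simp [List.getElem?_eq_getElem hmlt]
    simp only [aCurLoop, hget]
    by_cases hx : xs[m] == t
    · rw [if_pos hx, ih (acc + 1) (by omega), hrev, List.takeWhile_cons, if_pos hx]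
      simp only [List.length_cons]
      push_cast
      ring
    · rw [if_neg hx, hrev, List.takeWhile_cons, if_neg hx]
      simp

-- B's forward loop over the reversed tail counts the same leading block
theorem bCurLoop_eq (v : Bool) :
    ∀ (l : List Bool) (acc : Int),
      bCurLoop v l acc = acc + (((l.takeWhile (fun x => x == v)).length : Int)) := by
  intro l
  induction l with
  | nil => intro acc; simp [bCurLoop]
  | cons x rest ih =>
    intro acc
    by_cases hx : x == v
    · have hxe : x = v := by simpa using hx
      have hstep : bCurLoop v (x :: rest) acc = bCurLoop v rest (acc + 1) := by
        subst hxe; simp [bCurLoop]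
      rw [hstep, ih (acc + 1), List.takeWhile_cons, if_pos hx]
      simp only [List.length_cons]
      push_cast
      ring
    · have hxe : ¬ x = v := by simpa using hx
      have hstep : bCurLoop v (x :: rest) acc = acc := by
        simp [bCurLoop, hxe]
      rw [hstep, List.takeWhile_cons, if_neg hx]
      simp

-- specification of a running maximal streak: mstk t c xs extends the first run by c pending
-- t's and is floored at c
def mstk (t : Bool) : Int → List Bool → Int
  | c, [] => c
  | c, x :: xs => if x == t then mstk t (c + 1) xs else max c (mstk t 0 xs)

theorem mstk_ge (t : Bool) : ∀ (xs : List Bool) (c : Int), c ≤ mstk t c xs := by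
  intro xs
  induction xs with
  | nil => intro c; simp [mstk]
  | cons x rest ih =>
    intro c
    by_cases hx : x == t
    · simp only [mstk, if_pos hx]
      have := ih (c + 1)
      omega
    · simp only [mstk, if_neg hx]
      exact le_max_left _ _

theorem mstk_nonneg (t : Bool) (xs : List Bool) : 0 ≤ mstk t 0 xs := mstk_ge t xs 0

theorem aMax_fst : ∀ (xs : List Bool) (mc mi cc ci : Int), 0 ≤ cc → cc ≤ mc →
    (xs.foldl aMaxStep (mc, mi, cc, ci)).1 = max mc (mstk true cc xs) := by
  intro xs
  induction xs with
  | nil =>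
    intro mc mi cc ci _ h2
    simp [mstk, max_eq_left h2]
  | cons x rest ih =>
    intro mc mi cc ci h1 h2
    rw [List.foldl_cons]
    cases x
    · have hstep : aMaxStep (mc, mi, cc, ci) false = (mc, max mi (ci + 1), 0, ci + 1) := by
        simp [aMaxStep]
      have hm : mstk true cc (false :: rest) = max cc (mstk true 0 rest) := by
        simp [mstk]
      rw [hstep, ih mc (max mi (ci + 1)) 0 (ci + 1) le_rfl (by omega), hm,
        ← max_assoc, max_eq_left h2]
    · have hstep : aMaxStep (mc, mi, cc, ci) true = (max mc (cc + 1), mi, cc + 1, 0) := by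
        simp [aMaxStep]
      have hm : mstk true cc (true :: rest) = mstk true (cc + 1) rest := by
        simp [mstk]
      rw [hstep, ih (max mc (cc + 1)) mi (cc + 1) 0 (by omega) (le_max_right _ _), hm,
        max_assoc, max_eq_right (mstk_ge true rest (cc + 1))]

theorem aMax_snd : ∀ (xs : List Bool) (mc mi cc ci : Int), 0 ≤ ci → ci ≤ mi →
    (xs.foldl aMaxStep (mc, mi, cc, ci)).2.1 = max mi (mstk false ci xs) := by
  intro xs
  induction xs with
  | nil =>
    intro mc mi cc ci _ h2
    simp [mstk, max_eq_left h2]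
  | cons x rest ih =>
    intro mc mi cc ci h1 h2
    rw [List.foldl_cons]
    cases x
    · have hstep : aMaxStep (mc, mi, cc, ci) false = (mc, max mi (ci + 1), 0, ci + 1) := by
        simp [aMaxStep]
      have hm : mstk false ci (false :: rest) = mstk false (ci + 1) rest := by
        simp [mstk]
      rw [hstep, ih mc (max mi (ci + 1)) 0 (ci + 1) (by omega) (le_max_right _ _), hm,
        max_assoc, max_eq_right (mstk_ge false rest (ci + 1))]
    · have hstep : aMaxStep (mc, mi, cc, ci) true = (max mc (cc + 1), mi, cc + 1, 0) := by
        simp [aMaxStep]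
      have hm : mstk false ci (true :: rest) = max ci (mstk false 0 rest) := by
        simp [mstk]
      rw [hstep, ih (max mc (cc + 1)) mi (cc + 1) 0 le_rfl (by omega), hm,
        ← max_assoc, max_eq_left h2]

-- longest length among the runs with value t
def rmax (t : Bool) : List (Bool × Int) → Int
  | [] => 0
  | vn :: rs => if vn.1 == t then max vn.2 (rmax t rs) else rmax t rs

theorem rmax_nonneg (t : Bool) : ∀ (rs : List (Bool × Int)), 0 ≤ rmax t rs := by
  intro rs
  induction rs with
  | nil => simp [rmax]
  | cons vn rs ih =>
    by_cases h : vn.1 == t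
    · simp only [rmax, if_pos h]
      exact le_trans ih (le_max_right _ _)
    · simpa only [rmax, if_neg h] using ih

theorem bMax_eq : ∀ (rs : List (Bool × Int)) (a b : Int), 0 ≤ a → 0 ≤ b →
    rs.foldl bMaxStep (a, b) = (max a (rmax true rs), max b (rmax false rs)) := by
  intro rs
  induction rs with
  | nil =>
    intro a b ha hb
    simp [rmax, max_eq_left ha, max_eq_left hb]
  | cons vn rs ih =>
    intro a b ha hb
    rw [List.foldl_cons]
    cases hv : vn.1
    · have hstep : bMaxStep (a, b) vn = (a, max b vn.2) := by
        simp [bMaxStep, hv]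
      have hr1 : rmax true (vn :: rs) = rmax true rs := by
        simp [rmax, hv]
      have hr2 : rmax false (vn :: rs) = max vn.2 (rmax false rs) := by
        simp [rmax, hv]
      rw [hstep, ih a (max b vn.2) ha (le_trans hb (le_max_left _ _)), hr1, hr2,
        ← max_assoc]
    · have hstep : bMaxStep (a, b) vn = (max a vn.2, b) := by
        simp [bMaxStep, hv]
      have hr1 : rmax true (vn :: rs) = max vn.2 (rmax true rs) := by
        simp [rmax, hv]
      have hr2 : rmax false (vn :: rs) = rmax false rs := by
        simp [rmax, hv]
      rw [hstep, ih (max a vn.2) b (le_trans ha (le_max_left _ _)) hb, hr1, hr2,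
        ← max_assoc]

theorem mstk_true_prefix (t : Bool) :
    ∀ (l : List Bool) (c : Int) (ys : List Bool), (∀ x ∈ l, x == t) →
      mstk t c (l ++ ys) = mstk t (c + (l.length : Int)) ys := by
  intro l
  induction l with
  | nil => intro c ys _; simp
  | cons x l ih =>
    intro c ys h
    have hx : x == t := h x (by simp)
    simp only [List.cons_append, mstk, if_pos hx]
    rw [ih (c + 1) ys (fun y hy => h y (by simp [hy]))]
    congr 1
    simp only [List.length_cons]
    push_cast
    ring

theorem mstk_false_prefix (t : Bool) :
    ∀ (l : List Bool) (ys : List Bool), (∀ x ∈ l, (x == t) = false) →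
      mstk t 0 (l ++ ys) = mstk t 0 ys := by
  intro l
  induction l with
  | nil => intro ys _; simp
  | cons x l ih =>
    intro ys h
    have hx : (x == t) = false := h x (by simp)
    have hstep : mstk t 0 ((x :: l) ++ ys) = max 0 (mstk t 0 (l ++ ys)) := by
      simp [mstk, hx]
    rw [hstep, ih ys (fun y hy => h y (by simp [hy]))]
    exact max_eq_right (mstk_nonneg t _)

theorem mstk_head_ne (t : Bool) (zs : List Bool) (k : Int) (hk : 0 ≤ k)
    (hz : ∀ x, zs.head? = some x → (x == t) = false) :
    mstk t k zs = max k (mstk t 0 zs) := by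
  cases zs with
  | nil => simp [mstk, max_eq_left hk]
  | cons w zs' =>
    have hw : (w == t) = false := hz w rfl
    have h1 : mstk t k (w :: zs') = max k (mstk t 0 zs') := by
      simp [mstk, hw]
    have h2 : mstk t 0 (w :: zs') = max 0 (mstk t 0 zs') := by
      simp [mstk, hw]
    rw [h1, h2, max_eq_right (mstk_nonneg t zs')]

theorem mstk_runs (t : Bool) : ∀ (xs : List Bool), mstk t 0 xs = rmax t (runsOf xs) := by
  have key : ∀ (n : Nat) (xs : List Bool), xs.length ≤ n →
      mstk t 0 xs = rmax t (runsOf xs) := by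
    intro n
    induction n with
    | zero =>
      intro xs h
      have : xs = [] := List.length_eq_zero_iff.mp (by omega)
      subst this
      simp [mstk, runsOf, rmax]
    | succ n ih =>
      intro xs h
      cases xs with
      | nil => simp [mstk, runsOf, rmax]
      | cons v rest =>
        have hsplit : rest.takeWhile (fun x => x == v) ++ rest.dropWhile (fun x => x == v)
            = rest := List.takeWhile_append_dropWhile
        have hzlen : (rest.dropWhile (fun x => x == v)).length ≤ n := by
          have := List.length_dropWhile_le (fun x => x == v) rest
          simp at h
          omega
        have hIH := ih _ hzlen
        have hrun : runsOf (v :: rest) =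
            (v, 1 + (((rest.takeWhile (fun x => x == v)).length : Nat) : Int))
              :: runsOf (rest.dropWhile (fun x => x == v)) := by
          rw [runsOf]
        have hzhead : ∀ x, (rest.dropWhile (fun x => x == v)).head? = some x →
            (x == v) = false := by
          intro x hx
          have h' := List.head?_dropWhile_not (fun x => x == v) rest
          rw [hx] at h'
          exact h'
        by_cases hv : v == t
        · have hvt : v = t := by simpa using hv
          subst hvt
          have hpre : ∀ x ∈ rest.takeWhile (fun x => x == v), x == v :=
            fun x hx => List.mem_takeWhile_imp (p := fun x => x == v) hx
          calc mstk v 0 (v :: rest)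
              = mstk v 1 rest := by simp [mstk]
            _ = mstk v 1 (rest.takeWhile (fun x => x == v) ++
                  rest.dropWhile (fun x => x == v)) := by rw [hsplit]
            _ = mstk v (1 + ((rest.takeWhile (fun x => x == v)).length : Int))
                  (rest.dropWhile (fun x => x == v)) := by
                rw [mstk_true_prefix v _ 1 _ hpre]
            _ = max (1 + ((rest.takeWhile (fun x => x == v)).length : Int))
                  (mstk v 0 (rest.dropWhile (fun x => x == v))) :=
                mstk_head_ne v _ _ (by positivity) hzhead
            _ = rmax v (runsOf (v :: rest)) := by
                rw [hrun, hIH]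
                simp [rmax]
        · have hpre : ∀ x ∈ rest.takeWhile (fun x => x == v), (x == t) = false := by
            intro x hx
            have hxv : x == v := List.mem_takeWhile_imp (p := fun x => x == v) hx
            have : x = v := by simpa using hxv
            subst this
            simpa using hv
          calc mstk t 0 (v :: rest)
              = mstk t 0 rest := by
                have hvf : (v == t) = false := by simpa using hv
                have hstep : mstk t 0 (v :: rest) = max 0 (mstk t 0 rest) := by
                  simp [mstk, hvf]
                rw [hstep]
                exact max_eq_right (mstk_nonneg t rest)
            _ = mstk t 0 (rest.takeWhile (fun x => x == v) ++
                  rest.dropWhile (fun x => x == v)) := by rw [hsplit]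
            _ = mstk t 0 (rest.dropWhile (fun x => x == v)) :=
                mstk_false_prefix t _ _ hpre
            _ = rmax t (runsOf (v :: rest)) := by
                have hvf : (v == t) = false := by simpa using hv
                rw [hrun, hIH]
                simp [rmax, hvf]
  intro xs
  exact key xs.length xs le_rfl

-- the two bodies agree on every flattened list
theorem rest_eq (T : List Bool) : aRest T = bRest T := by
  by_cases hT : T = []
  · subst hT
    simp [aRest, bRest]
  · have hrev : T.reverse ≠ [] := by simpa using hT
    obtain ⟨v, rest, hvr⟩ : ∃ v rest, T.reverse = v :: rest := by
      cases h : T.reverse with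
      | nil => exact absurd h hrev
      | cons a l => exact ⟨a, l, rfl⟩
    have hget : PySem.List.pyGet? T (-1) = some v := by
      rw [PySem.List.pyGet?_neg_one, ← List.head?_reverse, hvr]
      rfl
    have hlen : 1 ≤ T.length := by
      cases T with
      | nil => exact absurd rfl hT
      | cons a l => simp
    have harg : ((T.length : Int)) - 2 = (((T.length - 1 : Nat) : Int)) - 1 := by omega
    have hcurA : aCurLoop T v (PySem.List.pyRange ((T.length : Int) - 2) (-1) (-1)) 1
        = 1 + (((rest.takeWhile (fun x => x == v)).length : Int)) := by
      rw [harg, aCurLoop_eq T v (T.length - 1) 1 (by omega)]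
      have h1 : T.take (T.length - 1) = T.dropLast := by
        rw [List.dropLast_eq_take]
      have h2 : T.dropLast.reverse = rest := by
        rw [← List.tail_reverse, hvr]
        rfl
      rw [h1, h2]
    have hcurB : bCurLoop v rest 1
        = 1 + (((rest.takeWhile (fun x => x == v)).length : Int)) :=
      bCurLoop_eq v rest 1
    have hA1 : (T.foldl aMaxStep (0, 0, 0, 0)).1 = mstk true 0 T := by
      rw [aMax_fst T 0 0 0 0 le_rfl le_rfl, max_eq_right (mstk_nonneg true T)]
    have hA2 : (T.foldl aMaxStep (0, 0, 0, 0)).2.1 = mstk false 0 T := by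
      rw [aMax_snd T 0 0 0 0 le_rfl le_rfl, max_eq_right (mstk_nonneg false T)]
    have hB : (runsOf T).foldl bMaxStep (0, 0)
        = (mstk true 0 T, mstk false 0 T) := by
      rw [bMax_eq (runsOf T) 0 0 le_rfl le_rfl,
        max_eq_right (rmax_nonneg true _), max_eq_right (rmax_nonneg false _),
        ← mstk_runs, ← mstk_runs]
    simp only [aRest, if_neg hT, hget, bRest, hvr]
    rw [hcurA, hcurB, hB, hA1, hA2]
    cases v <;> simp

-- ===== VERDICT (by name: the statement is the Claim_ definition above) =====
theorem calcular_racha_consecutiva_spec : Claim_equal_calcular_racha_consecutiva := by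
  intro rd _
  unfold Spec_calcular_racha_consecutiva
  by_cases hrd : rd = []
  · subst hrd
    simp [calcular_racha_consecutiva, calcular_racha_consecutiva_alt, bRest]
  · unfold calcular_racha_consecutiva calcular_racha_consecutiva_alt
    rw [if_neg hrd, flatten_eq]
    exact rest_eq _
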